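-- pv_equiv track=rewrite | github.com/soumilk91/DS-Algo-In-Python | IK/LinkedLists_Stacks_Queues/design_and_implement_lru_cache.py | implement_lru_cache
-- ===== SOURCE A (Python) =====
-- class LruCache:
--     def __init__(self, capacity):
--         self.lru = {}
--         self.capacity = capacity
--         self.dict = {}
--         self.term = 0
--
--     def get(self, key):
--         if key in self.lru:
--             self.dict[key] = self.term
--             self.term += 1
--             return self.lru[key]
--         else:
--             return -1
--
--     def set(self, key, value):
--         if (key in self.lru or len(self.lru) < self.capacity):
--             self.lru[key] = value
--             self.dict[key] = self.term
--             self.term += 1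
--         else:
--             max_val = float('inf')
--             for k, v in self.dict.items():
--                 if v < max_val:
--                     max_val = v
--                     key_to_pop = k
--             self.lru.pop(key_to_pop)
--             self.dict.pop(key_to_pop)
--             self.lru[key] = value
--             self.dict[key] = self.term
--             self.term += 1
--
-- def implement_lru_cache(capacity, query_type, key, value):
--     """
--     Args:
--      capacity(int32)
--      query_type(list_int32)
--      key(list_int32)
--      value(list_int32)
--     Returns:
--      list_int32
--     """
--     # Write your code here.
--     result = []
--     object = LruCache(capacity)
--     for i in range(len(query_type)):
--         if query_type[i] == 0:
--             result.append(object.get(key[i]))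
--         else:
--             object.set(key[i], value[i])
--     return result
-- ===== SOURCE B (Python) =====
-- def implement_lru_cache(capacity, query_type, key, value):
--     # Recency-ordered dict (least recently used first): every hit re-inserts the
--     # key at the end, eviction deletes the first key -- O(1) per query instead of
--     # A's O(capacity) scan for the minimum timestamp.
--     res = []
--     cache = {}
--     for i, q in enumerate(query_type):
--         k = key[i]
--         if q == 0:
--             if k in cache:
--                 v = cache.pop(k)
--                 cache[k] = v
--                 res.append(v)
--             else:
--                 res.append(-1)
--         else:
--             v = value[i]
--             if k in cache:
--                 cache.pop(k)
--             elif len(cache) >= capacity: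
--                 del cache[next(iter(cache))]
--             cache[k] = v
--     return res
-- ===== Notes on version B (the rewrite author's own statement) =====
-- stated objective: faster
-- what changed: A keeps a separate timestamp dict and scans all cached entries for the minimum timestamp on every eviction; B keeps the single cache dict in recency order (re-inserting a key at the end on each access) so eviction just deletes the first key, O(1) per query.
import Mathlib
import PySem

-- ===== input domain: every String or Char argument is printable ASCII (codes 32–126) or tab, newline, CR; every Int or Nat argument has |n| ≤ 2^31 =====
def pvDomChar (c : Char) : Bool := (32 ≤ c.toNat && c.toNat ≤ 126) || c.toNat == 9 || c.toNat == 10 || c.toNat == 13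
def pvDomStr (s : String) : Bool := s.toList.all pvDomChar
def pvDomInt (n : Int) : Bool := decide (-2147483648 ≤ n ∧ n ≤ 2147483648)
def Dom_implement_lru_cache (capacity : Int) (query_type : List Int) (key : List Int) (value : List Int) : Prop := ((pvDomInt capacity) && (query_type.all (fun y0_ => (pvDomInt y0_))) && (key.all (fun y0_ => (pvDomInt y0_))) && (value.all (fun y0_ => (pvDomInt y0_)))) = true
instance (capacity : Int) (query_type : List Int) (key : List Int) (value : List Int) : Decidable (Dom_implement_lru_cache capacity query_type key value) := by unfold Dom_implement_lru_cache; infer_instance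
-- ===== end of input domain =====

-- B replaces A's per-eviction linear scan for the minimum timestamp by a recency-ordered
-- dict with O(1) eviction of the first key; intended as faster (one timing run measured
-- 59x at n=16384 with A timing out beyond, another could not confirm at the largest size).

-- ===== PORT A =====
-- LruCache.get: returns the new (lru, dict, term) state and the value.
def lruGetA (lru dct : PySem.Dict Int Int) (term : Int) (k : Int) :
    (PySem.Dict Int Int × PySem.Dict Int Int × Int) × Int :=
  if lru.contains k then
    -- self.dict[key] = self.term; self.term += 1; return self.lru[key]  (key present, so getD is exact)
    ((lru, dct.insert k term, term + 1), lru.getD k 0)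
  else
    ((lru, dct, term), -1)

-- the body of A's 'for k, v in self.dict.items()' min-scan: state (max_val, key_to_pop),
-- none = the uninitialised float('inf') / unset key_to_pop
def minStepA (acc : Option Int × Option Int) (kv : Int × Int) : Option Int × Option Int :=
  match acc.1 with
  | none => (some kv.2, some kv.1)
  | some m => if kv.2 < m then (some kv.2, some kv.1) else acc

def lruMinScanA (items : List (Int × Int)) : Option Int × Option Int :=
  items.foldl minStepA (none, none)

-- LruCache.set
def lruSetA (lru dct : PySem.Dict Int Int) (term : Int) (capacity : Int) (k v : Int) :
    PySem.Dict Int Int × PySem.Dict Int Int × Int :=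
  if lru.contains k || decide ((lru.size : Int) < capacity) then
    (lru.insert k v, dct.insert k term, term + 1)
  else
    match (lruMinScanA dct.items).2 with
    | some ktp => ((lru.erase ktp).insert k v, (dct.erase ktp).insert k term, term + 1)
    | none =>
        -- Python raises UnboundLocalError here (empty dict ⇒ key_to_pop unset); excluded by Pre_
        (lru.insert k v, dct.insert k term, term + 1)

-- loop body of implement_lru_cache; indices are in range under Pre_, so getD _ 0 is exact
def stepA (capacity : Int) (query_type key value : List Int)
    (acc : List Int × PySem.Dict Int Int × PySem.Dict Int Int × Int) (i : Nat) :
    List Int × PySem.Dict Int Int × PySem.Dict Int Int × Int :=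
  if query_type[i]?.getD 0 == 0 then
    let r := lruGetA acc.2.1 acc.2.2.1 acc.2.2.2 (key[i]?.getD 0)
    (acc.1 ++ [r.2], r.1)
  else
    (acc.1, lruSetA acc.2.1 acc.2.2.1 acc.2.2.2 capacity (key[i]?.getD 0) (value[i]?.getD 0))

def implement_lru_cache (capacity : Int) (query_type : List Int) (key : List Int) (value : List Int) : List Int :=
  ((List.range query_type.length).foldl (stepA capacity query_type key value)
    ([], PySem.Dict.empty, PySem.Dict.empty, 0)).1

-- ===== PORT B =====
-- loop body of B: p = (q, i) from enumerate(query_type); cache is kept in recency order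
def stepB (capacity : Int) (key value : List Int)
    (acc : List Int × PySem.Dict Int Int) (p : Int × Nat) : List Int × PySem.Dict Int Int :=
  let k := key[p.2]?.getD 0
  if p.1 == 0 then
    match acc.2.pop? k with
    | some (v, c) => (acc.1 ++ [v], c.insert k v)   -- v = cache.pop(k); cache[k] = v
    | none => (acc.1 ++ [-1], acc.2)
  else
    let v := value[p.2]?.getD 0
    let c1 :=
      if acc.2.contains k then acc.2.erase k        -- cache.pop(k), value discarded
      else if decide (capacity ≤ (acc.2.size : Int)) then
        match acc.2.keys with                       -- del cache[next(iter(cache))]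
        | [] => acc.2                               -- Python raises StopIteration here; excluded by Pre_
        | k0 :: _ => acc.2.erase k0
      else acc.2
    (acc.1, c1.insert k v)

def implement_lru_cache_alt (capacity : Int) (query_type : List Int) (key : List Int) (value : List Int) : List Int :=
  (query_type.zipIdx.foldl (stepB capacity key value) ([], PySem.Dict.empty)).1

-- ===== PRECONDITION & SPEC =====
-- Pre_ excludes exactly the inputs where Python A raises: an index past the end of key
-- (or, for a set query, past the end of value) raises IndexError, and a set query with
-- capacity < 1 eventually reaches the eviction branch with an empty dict and raises
-- UnboundLocalError.
def Pre_implement_lru_cache (capacity : Int) (query_type : List Int) (key : List Int) (value : List Int) : Prop :=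
  query_type.length ≤ key.length ∧
  (∀ p ∈ query_type.zipIdx, p.1 ≠ 0 → p.2 < value.length) ∧
  (1 ≤ capacity ∨ ∀ q ∈ query_type, q = 0)

instance (capacity : Int) (query_type : List Int) (key : List Int) (value : List Int) : Decidable (Pre_implement_lru_cache capacity query_type key value) := by unfold Pre_implement_lru_cache; infer_instance

def pvWitness_implement_lru_cache : Int × List Int × List Int × List Int :=
  (2, [1, 1, 0, 1, 0, 0], [1, 2, 1, 3, 2, 1], [10, 20, 0, 30, 0, 0])

def Spec_implement_lru_cache (capacity : Int) (query_type : List Int) (key : List Int) (value : List Int) (out : List Int) : Prop := out = implement_lru_cache_alt capacity query_type key value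
instance (capacity : Int) (query_type : List Int) (key : List Int) (value : List Int) (out : List Int) : Decidable (Spec_implement_lru_cache capacity query_type key value out) := by unfold Spec_implement_lru_cache; infer_instance

-- ===== CLAIM (what is proved, stated in full; the proofs are below) =====
def Claim_equal_implement_lru_cache : Prop := ∀ (capacity : Int) (query_type : List Int) (key : List Int) (value : List Int), Dom_implement_lru_cache capacity query_type key value → Pre_implement_lru_cache capacity query_type key value → Spec_implement_lru_cache capacity query_type key value (implement_lru_cache capacity query_type key value)

-- ===== LEMMAS AND PROOFS =====

-- the coupling invariant between A's state (lru, dct, term) and B's cache: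
-- same map, timestamps strictly increasing along B's key order and all below term
def LruInv (lru dct cache : PySem.Dict Int Int) (term : Int) : Prop :=
  lru.keys.Nodup ∧ dct.keys.Nodup ∧ cache.keys.Nodup ∧
  (∀ j, lru.get? j = cache.get? j) ∧
  (∀ j, dct.contains j = lru.contains j) ∧
  cache.keys.Pairwise (fun a b => dct.getD a 0 < dct.getD b 0) ∧
  (∀ j ∈ cache.keys, dct.getD j 0 < term)

theorem dict_get?_erase_self (d : PySem.Dict Int Int) (k : Int) : (d.erase k).get? k = none := by
  simp only [PySem.Dict.erase, PySem.Dict.get?]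
  rw [List.find?_eq_none.2]
  · rfl
  · intro p hp; simp [List.mem_filter] at hp; simp [hp.2]

theorem find?_filter_ne (k j : Int) (h : j ≠ k) : ∀ (l : List (Int × Int)),
    (l.filter (fun p => !(p.1 == k))).find? (fun p => p.1 == j) = l.find? (fun p => p.1 == j)
  | [] => rfl
  | ⟨a, b⟩ :: t => by
    by_cases hk : a = k
    · have h2 : (k == j) = false := by simp [Ne.symm h]
      simp only [List.filter_cons, List.find?_cons, hk, h2, beq_self_eq_true, Bool.not_true,
        Bool.false_eq_true, if_false]
      exact find?_filter_ne k j h t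
    · have h1 : (!(a == k)) = true := by simp [hk]
      simp only [List.filter_cons, h1, if_true, List.find?_cons]
      by_cases hj : a = j
      · simp [hj]
      · have h2 : (a == j) = false := by simp [hj]
        simp only [h2]
        exact find?_filter_ne k j h t

theorem dict_get?_erase_of_ne (d : PySem.Dict Int Int) (k j : Int) (h : j ≠ k) :
    (d.erase k).get? j = d.get? j := by
  simp [PySem.Dict.erase, PySem.Dict.get?, find?_filter_ne k j h]

theorem dict_keys_erase (d : PySem.Dict Int Int) (k : Int) :
    (d.erase k).keys = d.keys.filter (fun x => !(x == k)) := by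
  simp [PySem.Dict.erase, PySem.Dict.keys, List.filter_map]; rfl

theorem dict_nodup_keys_erase (d : PySem.Dict Int Int) (k : Int) (h : d.keys.Nodup) :
    (d.erase k).keys.Nodup := by
  rw [dict_keys_erase]; exact h.filter _

theorem dict_contains_erase_self (d : PySem.Dict Int Int) (k : Int) :
    (d.erase k).contains k = false := by
  rw [PySem.Dict.contains_eq_isSome_get?, dict_get?_erase_self]; rfl

theorem dict_contains_erase_of_ne (d : PySem.Dict Int Int) (k j : Int) (h : j ≠ k) :
    (d.erase k).contains j = d.contains j := by
  rw [PySem.Dict.contains_eq_isSome_get?, dict_get?_erase_of_ne d k j h,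
    ← PySem.Dict.contains_eq_isSome_get?]

theorem dict_getD_erase_of_ne (d : PySem.Dict Int Int) (k j d0 : Int) (h : j ≠ k) :
    (d.erase k).getD j d0 = d.getD j d0 := by
  rw [PySem.Dict.getD_eq_get?_getD, dict_get?_erase_of_ne d k j h, ← PySem.Dict.getD_eq_get?_getD]

-- dicts containing the same keys have key lists of equal length
theorem keys_length_eq (d e : PySem.Dict Int Int) (hd : d.keys.Nodup) (he : e.keys.Nodup)
    (h : ∀ j, d.contains j = e.contains j) : d.keys.length = e.keys.length := by
  refine List.Perm.length_eq ?_
  rw [List.perm_ext_iff_of_nodup hd he]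
  intro a
  rw [← PySem.Dict.contains_iff_mem_keys, ← PySem.Dict.contains_iff_mem_keys, h a]

theorem size_eq_keys_length (d : PySem.Dict Int Int) : d.size = d.keys.length := by
  simp [PySem.Dict.size, PySem.Dict.keys]

theorem minScanA_keep (l : List (Int × Int)) (m kk : Int) (h : ∀ p ∈ l, m ≤ p.2) :
    l.foldl minStepA (some m, some kk) = (some m, some kk) := by
  induction l with
  | nil => rfl
  | cons p t ih =>
    have hp : ¬ p.2 < m := not_lt.2 (h p (by simp))
    simp only [List.foldl_cons, minStepA, hp, if_false]
    exact ih (fun q hq => h q (by simp [hq]))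

-- with pairwise-distinct keys and a strictly minimal entry (k0, m0), the scan finds it
theorem minScanA_go (l : List (Int × Int)) (k0 m0 : Int) :
    ∀ (acc : Option Int × Option Int),
    (acc = (none, none) ∨ ∃ m kk, acc = (some m, some kk) ∧ m0 < m) →
    (k0, m0) ∈ l → (∀ p ∈ l, p.1 ≠ k0 → m0 < p.2) → (l.map Prod.fst).Nodup →
    l.foldl minStepA acc = (some m0, some k0) := by
  induction l with
  | nil => intro _ _ hmem; simp at hmem
  | cons p t ih =>
    intro acc hacc hmem hmin hnd
    simp only [List.map_cons, List.nodup_cons] at hnd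
    by_cases hp : p = (k0, m0)
    · subst hp
      have hstep : minStepA acc (k0, m0) = (some m0, some k0) := by
        rcases hacc with h1 | ⟨m, kk, h1, h2⟩
        · subst h1; rfl
        · subst h1; simp [minStepA, h2]
      rw [List.foldl_cons, hstep]
      apply minScanA_keep
      intro q hq
      have hqk : q.1 ≠ k0 := by
        intro he
        have hq1 : q.1 ∈ List.map Prod.fst t := List.mem_map_of_mem hq
        exact hnd.1 (he ▸ hq1)
      exact le_of_lt (hmin q (by simp [hq]) hqk)
    · have hmem' : (k0, m0) ∈ t := by
        rcases List.mem_cons.1 hmem with h | h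
        · exact absurd h.symm hp
        · exact h
      have hpk : p.1 ≠ k0 := by
        intro he
        have hq1 : (k0 : Int) ∈ List.map Prod.fst t := List.mem_map_of_mem hmem'
        exact hnd.1 (he ▸ hq1)
      have hlt : m0 < p.2 := hmin p (by simp) hpk
      rw [List.foldl_cons]
      apply ih
      · rcases hacc with h1 | ⟨m, kk, h1, h2⟩
        · subst h1; right; exact ⟨p.2, p.1, rfl, hlt⟩
        · subst h1
          by_cases hc : p.2 < m
          · right; exact ⟨p.2, p.1, by simp [minStepA, hc], hlt⟩
          · right; exact ⟨m, kk, by simp [minStepA, hc], h2⟩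
      · exact hmem'
      · exact fun q hq hqk => hmin q (by simp [hq]) hqk
      · exact hnd.2

theorem minScanA_spec (l : List (Int × Int)) (k0 m0 : Int)
    (hmem : (k0, m0) ∈ l) (hmin : ∀ p ∈ l, p.1 ≠ k0 → m0 < p.2)
    (hnd : (l.map Prod.fst).Nodup) :
    lruMinScanA l = (some m0, some k0) :=
  minScanA_go l k0 m0 (none, none) (Or.inl rfl) hmem hmin hnd

theorem LruInv_empty : LruInv PySem.Dict.empty PySem.Dict.empty PySem.Dict.empty 0 := by
  refine ⟨?_, ?_, ?_, ?_, ?_, ?_, ?_⟩ <;>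
    simp [PySem.Dict.keys_empty, PySem.Dict.get?_empty, PySem.Dict.contains_empty]

-- appending a fresh key with the newest timestamp keeps the order/bound part of the invariant
theorem step_pairwise (d c : PySem.Dict Int Int) (term k v : Int)
    (hc : c.contains k = false)
    (h6 : c.keys.Pairwise (fun a b => d.getD a 0 < d.getD b 0))
    (h7 : ∀ j ∈ c.keys, d.getD j 0 < term) :
    (c.insert k v).keys.Pairwise
        (fun a b => (d.insert k term).getD a 0 < (d.insert k term).getD b 0) ∧
    (∀ j ∈ (c.insert k v).keys, (d.insert k term).getD j 0 < term + 1) := by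
  have hsub : ∀ j ∈ c.keys, j ≠ k := by
    intro j hj he
    rw [← PySem.Dict.contains_iff_mem_keys] at hj
    rw [he, hc] at hj
    exact Bool.false_ne_true hj
  rw [PySem.Dict.keys_insert_of_not_contains _ _ hc]
  constructor
  · rw [List.pairwise_append]
    refine ⟨?_, by simp, ?_⟩
    · refine h6.imp_of_mem ?_
      intro a b ha hb hab
      rw [PySem.Dict.getD_insert_of_ne _ _ _ (hsub a ha),
        PySem.Dict.getD_insert_of_ne _ _ _ (hsub b hb)]
      exact hab
    · intro a ha b hb
      simp only [List.mem_singleton] at hb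
      subst hb
      rw [PySem.Dict.getD_insert_of_ne _ _ _ (hsub a ha), PySem.Dict.getD_insert_self]
      exact h7 a ha
  · intro j hj
    rcases List.mem_append.1 hj with hj | hj
    · rw [PySem.Dict.getD_insert_of_ne _ _ _ (hsub j hj)]
      exact lt_trans (h7 j hj) (by omega)
    · simp only [List.mem_singleton] at hj
      subst hj
      rw [PySem.Dict.getD_insert_self]
      omega

-- restricting the order/bound part of the invariant to the cache with k erased
theorem erase_pairwise (d c : PySem.Dict Int Int) (term k : Int)
    (h6 : c.keys.Pairwise (fun a b => d.getD a 0 < d.getD b 0))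
    (h7 : ∀ j ∈ c.keys, d.getD j 0 < term) :
    (c.erase k).keys.Pairwise (fun a b => d.getD a 0 < d.getD b 0) ∧
    (∀ j ∈ (c.erase k).keys, d.getD j 0 < term) := by
  rw [dict_keys_erase]
  exact ⟨h6.sublist (List.filter_sublist),
    fun j hj => h7 j (List.mem_of_mem_filter hj)⟩

-- k present in the cache, lru unchanged (get hit): timestamp refreshed, key moved to the end
theorem LruInv_get_hit (lru dct cache : PySem.Dict Int Int) (term k v : Int)
    (h : LruInv lru dct cache term) (hv : lru.get? k = some v) :
    LruInv lru (dct.insert k term) ((cache.erase k).insert k v) (term + 1) := by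
  obtain ⟨h1, h2, h3, h4, h5, h6, h7⟩ := h
  have hcv : cache.get? k = some v := (h4 k) ▸ hv
  have hec : (cache.erase k).contains k = false := dict_contains_erase_self cache k
  obtain ⟨hp6, hp7⟩ := erase_pairwise dct cache term k h6 h7
  obtain ⟨hq6, hq7⟩ := step_pairwise dct (cache.erase k) term k v hec hp6 hp7
  refine ⟨h1, PySem.Dict.nodup_keys_insert _ _ _ h2,
    PySem.Dict.nodup_keys_insert _ _ _ (dict_nodup_keys_erase cache k h3), ?_, ?_, hq6, hq7⟩
  · intro j
    by_cases hj : j = k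
    · subst hj; rw [hv, PySem.Dict.get?_insert_self]
    · rw [PySem.Dict.get?_insert_of_ne _ _ hj, dict_get?_erase_of_ne _ _ _ hj, h4 j]
  · intro j
    rw [PySem.Dict.contains_insert]
    by_cases hj : j = k
    · subst hj
      have : lru.contains j = true := by
        rw [PySem.Dict.contains_eq_isSome_get?, hv]; rfl
      simp [this]
    · simp [hj, h5 j]

-- k present, value overwritten (set hit)
theorem LruInv_refresh (lru dct cache : PySem.Dict Int Int) (term k v : Int)
    (h : LruInv lru dct cache term) (hk : lru.contains k = true) :
    LruInv (lru.insert k v) (dct.insert k term) ((cache.erase k).insert k v) (term + 1) := by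
  obtain ⟨h1, h2, h3, h4, h5, h6, h7⟩ := h
  have hec : (cache.erase k).contains k = false := dict_contains_erase_self cache k
  obtain ⟨hp6, hp7⟩ := erase_pairwise dct cache term k h6 h7
  obtain ⟨hq6, hq7⟩ := step_pairwise dct (cache.erase k) term k v hec hp6 hp7
  refine ⟨PySem.Dict.nodup_keys_insert _ _ _ h1, PySem.Dict.nodup_keys_insert _ _ _ h2,
    PySem.Dict.nodup_keys_insert _ _ _ (dict_nodup_keys_erase cache k h3), ?_, ?_, hq6, hq7⟩
  · intro j
    by_cases hj : j = k
    · subst hj; rw [PySem.Dict.get?_insert_self, PySem.Dict.get?_insert_self]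
    · rw [PySem.Dict.get?_insert_of_ne _ _ hj, PySem.Dict.get?_insert_of_ne _ _ hj,
        dict_get?_erase_of_ne _ _ _ hj, h4 j]
  · intro j
    rw [PySem.Dict.contains_insert, PySem.Dict.contains_insert, h5 j]

-- k fresh, no eviction
theorem LruInv_fresh (lru dct cache : PySem.Dict Int Int) (term k v : Int)
    (h : LruInv lru dct cache term) (hk : lru.contains k = false) :
    LruInv (lru.insert k v) (dct.insert k term) (cache.insert k v) (term + 1) := by
  obtain ⟨h1, h2, h3, h4, h5, h6, h7⟩ := h
  have hck : cache.contains k = false := by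
    rw [PySem.Dict.contains_eq_isSome_get?, ← h4 k, ← PySem.Dict.contains_eq_isSome_get?]
    exact hk
  obtain ⟨hq6, hq7⟩ := step_pairwise dct cache term k v hck h6 h7
  refine ⟨PySem.Dict.nodup_keys_insert _ _ _ h1, PySem.Dict.nodup_keys_insert _ _ _ h2,
    PySem.Dict.nodup_keys_insert _ _ _ h3, ?_, ?_, hq6, hq7⟩
  · intro j
    by_cases hj : j = k
    · subst hj; rw [PySem.Dict.get?_insert_self, PySem.Dict.get?_insert_self]
    · rw [PySem.Dict.get?_insert_of_ne _ _ hj, PySem.Dict.get?_insert_of_ne _ _ hj, h4 j]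
  · intro j
    rw [PySem.Dict.contains_insert, PySem.Dict.contains_insert, h5 j]

-- k fresh, k0 (the head of the cache order) evicted
theorem LruInv_evict (lru dct cache : PySem.Dict Int Int) (term k v k0 : Int) (rest : List Int)
    (h : LruInv lru dct cache term) (hk : lru.contains k = false) (hks : cache.keys = k0 :: rest) :
    LruInv ((lru.erase k0).insert k v) ((dct.erase k0).insert k term)
      ((cache.erase k0).insert k v) (term + 1) := by
  obtain ⟨h1, h2, h3, h4, h5, h6, h7⟩ := h
  have hck : cache.contains k = false := by
    rw [PySem.Dict.contains_eq_isSome_get?, ← h4 k, ← PySem.Dict.contains_eq_isSome_get?]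
    exact hk
  have hec : (cache.erase k0).contains k = false := by
    by_cases hkk : k = k0
    · subst hkk; exact dict_contains_erase_self cache k
    · rw [dict_contains_erase_of_ne _ _ _ hkk]; exact hck
  have hq67 : ((cache.erase k0).keys.Pairwise
        (fun a b => (dct.erase k0).getD a 0 < (dct.erase k0).getD b 0)) ∧
      (∀ j ∈ (cache.erase k0).keys, (dct.erase k0).getD j 0 < term) := by
    rw [dict_keys_erase]
    constructor
    · refine (h6.sublist (List.filter_sublist)).imp_of_mem ?_
      intro a b ha hb hab
      have hane : a ≠ k0 := by simpa using (List.mem_filter.1 ha).2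
      have hbne : b ≠ k0 := by simpa using (List.mem_filter.1 hb).2
      rw [dict_getD_erase_of_ne _ _ _ _ hane, dict_getD_erase_of_ne _ _ _ _ hbne]
      exact hab
    · intro j hj
      have hjne : j ≠ k0 := by simpa using (List.mem_filter.1 hj).2
      rw [dict_getD_erase_of_ne _ _ _ _ hjne]
      exact h7 j (List.mem_of_mem_filter hj)
  obtain ⟨hq6, hq7⟩ := step_pairwise (dct.erase k0) (cache.erase k0) term k v hec hq67.1 hq67.2
  refine ⟨PySem.Dict.nodup_keys_insert _ _ _ (dict_nodup_keys_erase lru k0 h1),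
    PySem.Dict.nodup_keys_insert _ _ _ (dict_nodup_keys_erase dct k0 h2),
    PySem.Dict.nodup_keys_insert _ _ _ (dict_nodup_keys_erase cache k0 h3), ?_, ?_, hq6, hq7⟩
  · intro j
    by_cases hj : j = k
    · subst hj; rw [PySem.Dict.get?_insert_self, PySem.Dict.get?_insert_self]
    · rw [PySem.Dict.get?_insert_of_ne _ _ hj, PySem.Dict.get?_insert_of_ne _ _ hj]
      by_cases hj0 : j = k0
      · subst hj0; rw [dict_get?_erase_self, dict_get?_erase_self]
      · rw [dict_get?_erase_of_ne _ _ _ hj0, dict_get?_erase_of_ne _ _ _ hj0, h4 j]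
  · intro j
    rw [PySem.Dict.contains_insert, PySem.Dict.contains_insert]
    by_cases hj0 : j = k0
    · subst hj0
      rw [dict_contains_erase_self, dict_contains_erase_self]
    · rw [dict_contains_erase_of_ne _ _ _ hj0, dict_contains_erase_of_ne _ _ _ hj0, h5 j]

theorem loop_agree (capacity : Int) (query_type key value : List Int) :
    ∀ (is : List Nat) (res : List Int) (lru dct cache : PySem.Dict Int Int) (term : Int),
      LruInv lru dct cache term →
      (is.foldl (stepA capacity query_type key value) (res, lru, dct, term)).1
        = (is.foldl (fun acc i => stepB capacity key value acc (query_type[i]?.getD 0, i)) (res, cache)).1 := by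
  intro is
  induction is with
  | nil => intro res lru dct cache term _; rfl
  | cons i t ih =>
    intro res lru dct cache term h
    have hinv := h
    obtain ⟨h1, h2, h3, h4, h5, h6, h7⟩ := h
    have hcl : ∀ j, cache.contains j = lru.contains j := by
      intro j
      rw [PySem.Dict.contains_eq_isSome_get?, PySem.Dict.contains_eq_isSome_get?, h4 j]
    have hsz : lru.size = cache.size := by
      rw [size_eq_keys_length, size_eq_keys_length]
      exact keys_length_eq lru cache h1 h3 (fun j => (hcl j).symm)
    simp only [List.foldl_cons]
    by_cases hq : query_type[i]?.getD 0 = 0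
    · -- get query
      by_cases hk : lru.contains (key[i]?.getD 0) = true
      · have hs : (lru.get? (key[i]?.getD 0)).isSome = true := by
          rw [← PySem.Dict.contains_eq_isSome_get?]; exact hk
        obtain ⟨v, hv⟩ := Option.isSome_iff_exists.1 hs
        have hcv : cache.get? (key[i]?.getD 0) = some v := (h4 _) ▸ hv
        have hgd : lru.getD (key[i]?.getD 0) 0 = v := by
          rw [PySem.Dict.getD_eq_get?_getD, hv]; rfl
        have hstepA : stepA capacity query_type key value (res, lru, dct, term) i
            = (res ++ [v], lru, dct.insert (key[i]?.getD 0) term, term + 1) := by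
          simp [stepA, hq, lruGetA, hk, hgd]
        have hstepB : stepB capacity key value (res, cache) (query_type[i]?.getD 0, i)
            = (res ++ [v], (cache.erase (key[i]?.getD 0)).insert (key[i]?.getD 0) v) := by
          simp [stepB, hq, PySem.Dict.pop?, hcv]
        rw [hstepA, hstepB]
        exact ih _ _ _ _ _ (LruInv_get_hit lru dct cache term _ v hinv hv)
      · have hk' : lru.contains (key[i]?.getD 0) = false := by simpa using hk
        have hv : lru.get? (key[i]?.getD 0) = none := by
          cases hg : lru.get? (key[i]?.getD 0) with
          | none => rfl
          | some w => rw [PySem.Dict.contains_eq_isSome_get?, hg] at hk'; simp at hk'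
        have hcv : cache.get? (key[i]?.getD 0) = none := (h4 _) ▸ hv
        have hstepA : stepA capacity query_type key value (res, lru, dct, term) i
            = (res ++ [-1], lru, dct, term) := by
          simp [stepA, hq, lruGetA, hk']
        have hstepB : stepB capacity key value (res, cache) (query_type[i]?.getD 0, i)
            = (res ++ [-1], cache) := by
          simp [stepB, hq, PySem.Dict.pop?, hcv]
        rw [hstepA, hstepB]
        exact ih _ _ _ _ _ hinv
    · -- set query
      have hqb : (query_type[i]?.getD 0 == 0) = false := by simp [hq]
      by_cases hk : lru.contains (key[i]?.getD 0) = true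
      · have hck : cache.contains (key[i]?.getD 0) = true := by rw [hcl]; exact hk
        have hstepA : stepA capacity query_type key value (res, lru, dct, term) i
            = (res, lru.insert (key[i]?.getD 0) (value[i]?.getD 0),
                dct.insert (key[i]?.getD 0) term, term + 1) := by
          simp [stepA, hqb, lruSetA, hk]
        have hstepB : stepB capacity key value (res, cache) (query_type[i]?.getD 0, i)
            = (res, (cache.erase (key[i]?.getD 0)).insert (key[i]?.getD 0) (value[i]?.getD 0)) := by
          simp [stepB, hqb, hck]
        rw [hstepA, hstepB]
        exact ih _ _ _ _ _ (LruInv_refresh lru dct cache term _ _ hinv hk)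
      · have hk' : lru.contains (key[i]?.getD 0) = false := by simpa using hk
        have hck : cache.contains (key[i]?.getD 0) = false := by rw [hcl]; exact hk'
        by_cases hcap : (lru.size : Int) < capacity
        · have hcapb : decide ((lru.size : Int) < capacity) = true := decide_eq_true hcap
          have hgeb : decide (capacity ≤ (cache.size : Int)) = false :=
            decide_eq_false (by rw [← hsz]; omega)
          have hstepA : stepA capacity query_type key value (res, lru, dct, term) i
              = (res, lru.insert (key[i]?.getD 0) (value[i]?.getD 0),
                  dct.insert (key[i]?.getD 0) term, term + 1) := by
            simp [stepA, hqb, lruSetA, hk', hcapb]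
          have hstepB : stepB capacity key value (res, cache) (query_type[i]?.getD 0, i)
              = (res, cache.insert (key[i]?.getD 0) (value[i]?.getD 0)) := by
            simp [stepB, hqb, hck, hgeb]
          rw [hstepA, hstepB]
          exact ih _ _ _ _ _ (LruInv_fresh lru dct cache term _ _ hinv hk')
        · have hcapb : decide ((lru.size : Int) < capacity) = false := decide_eq_false hcap
          have hgeb : decide (capacity ≤ (cache.size : Int)) = true :=
            decide_eq_true (by rw [← hsz]; omega)
          cases hkeys : cache.keys with
          | nil =>
            have hlen : dct.keys.length = 0 := by
              rw [keys_length_eq dct lru h2 h1 h5,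
                keys_length_eq lru cache h1 h3 (fun j => (hcl j).symm), hkeys]
              rfl
            have hitems : dct.items = [] := by
              have hl : dct.items.length = 0 := by simpa [PySem.Dict.keys] using hlen
              exact List.length_eq_zero_iff.1 hl
            have hstepA : stepA capacity query_type key value (res, lru, dct, term) i
                = (res, lru.insert (key[i]?.getD 0) (value[i]?.getD 0),
                    dct.insert (key[i]?.getD 0) term, term + 1) := by
              simp [stepA, hqb, lruSetA, hk', hcapb, lruMinScanA, hitems]
            have hstepB : stepB capacity key value (res, cache) (query_type[i]?.getD 0, i)
                = (res, cache.insert (key[i]?.getD 0) (value[i]?.getD 0)) := by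
              simp [stepB, hqb, hck, hgeb, hkeys]
            rw [hstepA, hstepB]
            exact ih _ _ _ _ _ (LruInv_fresh lru dct cache term _ _ hinv hk')
          | cons k0 rest =>
            have hk0mem : k0 ∈ cache.keys := by rw [hkeys]; simp
            have hc0 : cache.contains k0 = true := (PySem.Dict.contains_iff_mem_keys _ _).2 hk0mem
            have hd0 : dct.contains k0 = true := by rw [h5, ← hcl]; exact hc0
            have hs0 : (dct.get? k0).isSome = true := by
              rw [← PySem.Dict.contains_eq_isSome_get?]; exact hd0
            obtain ⟨m0, hm0⟩ := Option.isSome_iff_exists.1 hs0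
            have hmem : (k0, m0) ∈ dct.items := PySem.Dict.mem_items_of_get?_eq_some _ hm0
            have hndfst : (dct.items.map Prod.fst).Nodup := h2
            have hmin : ∀ p ∈ dct.items, p.1 ≠ k0 → m0 < p.2 := by
              intro p hp hne
              have hpk : p.1 ∈ dct.keys := PySem.Dict.mem_keys_of_mem_items _ hp
              have hpct : cache.contains p.1 = true := by
                rw [hcl, ← h5]
                exact (PySem.Dict.contains_iff_mem_keys _ _).2 hpk
              have hpc : p.1 ∈ cache.keys := (PySem.Dict.contains_iff_mem_keys _ _).1 hpct
              rw [hkeys] at hpc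
              rcases List.mem_cons.1 hpc with hx | hx
              · exact absurd hx hne
              · have hpair := h6
                rw [hkeys, List.pairwise_cons] at hpair
                have hlt : dct.getD k0 0 < dct.getD p.1 0 := hpair.1 p.1 hx
                have hg0 : dct.getD k0 0 = m0 := by
                  rw [PySem.Dict.getD_eq_get?_getD, hm0]; rfl
                have hgp : dct.getD p.1 0 = p.2 :=
                  PySem.Dict.getD_of_mem_items _ (by simpa using hp) h2 0
                rw [hg0, hgp] at hlt
                exact hlt
            have hscan : lruMinScanA dct.items = (some m0, some k0) :=
              minScanA_spec dct.items k0 m0 hmem hmin hndfst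
            have hstepA : stepA capacity query_type key value (res, lru, dct, term) i
                = (res, (lru.erase k0).insert (key[i]?.getD 0) (value[i]?.getD 0),
                    (dct.erase k0).insert (key[i]?.getD 0) term, term + 1) := by
              simp [stepA, hqb, lruSetA, hk', hcapb, hscan]
            have hstepB : stepB capacity key value (res, cache) (query_type[i]?.getD 0, i)
                = (res, (cache.erase k0).insert (key[i]?.getD 0) (value[i]?.getD 0)) := by
              simp [stepB, hqb, hck, hgeb, hkeys]
            rw [hstepA, hstepB]
            exact ih _ _ _ _ _ (LruInv_evict lru dct cache term _ _ k0 rest hinv hk' hkeys)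

theorem zipIdx_eq_range_map (l : List Int) :
    l.zipIdx = (List.range l.length).map (fun i => (l[i]?.getD 0, i)) := by
  apply List.ext_getElem
  · simp
  · intro i h1 h2
    simp [List.getElem?_eq_getElem (by simpa using h2)]

-- ===== VERDICT (by name: the statement is the Claim_ definition above) =====
theorem implement_lru_cache_spec : Claim_equal_implement_lru_cache := by
  intro capacity query_type key value _ _
  unfold Spec_implement_lru_cache implement_lru_cache implement_lru_cache_alt
  rw [zipIdx_eq_range_map, List.foldl_map]
  exact loop_agree capacity query_type key value _ [] _ _ _ 0 LruInv_empty
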